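-- pv_equiv track=rewrite | github.com/ndaly111/PolymarketAlerts | weather/scripts/post_weather_edges_discord.py | _join_blocks_with_limit
-- ===== SOURCE A (Python) =====
-- from typing import Any, List, Optional
--
-- def _truncate(s: str, max_len: int = 1900) -> str:
--     s = (s or "").strip()
--     if len(s) <= max_len:
--         return s
--     return s[: max_len - 20].rstrip() + "\n\n...(truncated)"
--
-- def _join_blocks_with_limit(blocks: List[str], limit: int = 1990) -> str:
--     """
--     Join blocks separated by blank lines but NEVER exceed the limit.
--     If it won't fit, stop at a block boundary (no mid-city slicing).
--     """
--     out: List[str] = []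
--     used = 0
--     sep = "\n\n"
--     for b in blocks:
--         b = (b or "").strip()
--         if not b:
--             continue
--         add = b if not out else (sep + b)
--         if used + len(add) > limit:
--             break
--         out.append(b)
--         used += len(add)
--     if not out:
--         return ""
--     txt = sep.join(out).strip()
--     return txt if len(txt) <= limit else _truncate(txt, max_len=limit)
-- ===== SOURCE B (Python) =====
-- from typing import List
--
--
-- def _join_blocks_with_limit(blocks: List[str], limit: int = 1990) -> str:
--     # Build the cleaned list, then a cumulative-cost table, then cut at the
--     # first total that exceeds the limit and join the surviving prefix.
--     cleaned = [s for b in blocks if (s := (b or "").strip())]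
--     if not cleaned:
--         return ""
--     totals = [len(cleaned[0])]
--     for x in cleaned[1:]:
--         totals.append(totals[-1] + 2 + len(x))  # 2 = len("\n\n") separator
--     k = next((i for i, t in enumerate(totals) if t > limit), len(cleaned))
--     return "\n\n".join(cleaned[:k])
-- ===== Notes on version B (the rewrite author's own statement) =====
-- stated objective: alternative
-- what changed: Replaces A's fused strip-check-accumulate-break loop (plus a final strip and truncate fallback) with three separate passes: clean the blocks, build a cumulative length table, then cut at the first total exceeding the limit and join; the equivalence proof shows A's final strip and _truncate branch are dead code.
import Mathlib
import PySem

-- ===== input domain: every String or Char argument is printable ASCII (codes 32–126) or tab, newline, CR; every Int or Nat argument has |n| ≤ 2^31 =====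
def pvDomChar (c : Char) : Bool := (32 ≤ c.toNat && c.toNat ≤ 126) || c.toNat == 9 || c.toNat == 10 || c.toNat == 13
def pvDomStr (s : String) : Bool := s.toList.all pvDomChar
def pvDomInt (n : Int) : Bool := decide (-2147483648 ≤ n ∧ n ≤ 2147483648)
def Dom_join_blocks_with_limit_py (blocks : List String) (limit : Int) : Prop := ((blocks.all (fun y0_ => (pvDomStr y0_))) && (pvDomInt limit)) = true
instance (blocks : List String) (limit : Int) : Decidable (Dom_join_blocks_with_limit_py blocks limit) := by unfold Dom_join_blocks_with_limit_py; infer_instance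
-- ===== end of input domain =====

-- B replaces A's fused strip-accumulate-break loop (with trailing strip and _truncate fallback) by
-- three separate passes: clean, cumulative-length table, cut at the first overflow and join.
-- Objective: alternative decomposition; the proof shows A's trailing strip and _truncate branch are dead code.

-- ===== PORT A =====
-- port of _truncate (exact: strip, length test, slice + rstrip + literal suffix)
def pv_truncate (s : String) (maxLen : Int) : String :=
  let s := PySem.Str.strip s
  if PySem.Str.len s ≤ maxLen then s
  else PySem.Str.rstrip (PySem.Str.slice s none (some (maxLen - 20))) ++ "\n\n...(truncated)"

-- A's for-loop: state (out, used); `break` returns out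
def pvLoopA (limit : Int) : List String → List String → Int → List String
  | [], out, _ => out
  | b :: rest, out, used =>
    let b := PySem.Str.strip b
    if b = "" then pvLoopA limit rest out used
    else
      let add := if out = [] then b else "\n\n" ++ b
      if limit < used + PySem.Str.len add then out
      else pvLoopA limit rest (out ++ [b]) (used + PySem.Str.len add)

def join_blocks_with_limit_py (blocks : List String) (limit : Int) : String :=
  let out := pvLoopA limit blocks [] 0
  if out = [] then ""
  else
    let txt := PySem.Str.strip (PySem.Str.join "\n\n" out)
    if PySem.Str.len txt ≤ limit then txt else pv_truncate txt limit

-- ===== PORT B =====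
-- the `totals.append(totals[-1] + 2 + len(x))` loop, carrying totals[-1]
def pvTotalsB (t0 : Int) : List String → List Int
  | [] => [t0]
  | x :: xs => t0 :: pvTotalsB (t0 + 2 + PySem.Str.len x) xs

def join_blocks_with_limit_py_alt (blocks : List String) (limit : Int) : String :=
  let cleaned := blocks.filterMap (fun b =>
    let s := PySem.Str.strip b; if s = "" then none else some s)
  match cleaned with
  | [] => ""
  | c0 :: rest =>
    let totals := pvTotalsB (PySem.Str.len c0) rest
    let k := (totals.findIdx? (fun t => decide (limit < t))).getD cleaned.length
    PySem.Str.join "\n\n" (cleaned.take k)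

-- ===== PRECONDITION & SPEC =====
def Spec_join_blocks_with_limit_py (blocks : List String) (limit : Int) (out : String) : Prop := out = join_blocks_with_limit_py_alt blocks limit
instance (blocks : List String) (limit : Int) (out : String) : Decidable (Spec_join_blocks_with_limit_py blocks limit out) := by unfold Spec_join_blocks_with_limit_py; infer_instance

-- ===== CLAIM (what is proved, stated in full; the proofs are below) =====
def Claim_equal_join_blocks_with_limit_py : Prop := ∀ (blocks : List String) (limit : Int), Dom_join_blocks_with_limit_py blocks limit → Spec_join_blocks_with_limit_py blocks limit (join_blocks_with_limit_py blocks limit)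

-- ===== LEMMAS AND PROOFS =====

-- A's loop restricted to the cleaned list (strip and emptiness test already done)
def pvLoopC (limit : Int) : List String → List String → Int → List String
  | [], out, _ => out
  | c :: rest, out, used =>
    if limit < used + (if out = [] then PySem.Str.len c else 2 + PySem.Str.len c) then out
    else pvLoopC limit rest (out ++ [c])
      (used + (if out = [] then PySem.Str.len c else 2 + PySem.Str.len c))

-- number of further elements A's loop takes from state `used` (out already nonempty)
def pvTake (limit : Int) : Int → List String → Nat
  | _, [] => 0
  | used, x :: xs =>
    if limit < used + 2 + PySem.Str.len x then 0
    else pvTake limit (used + 2 + PySem.Str.len x) xs + 1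

theorem pv_str_ext {s t : String} (h : s.toList = t.toList) : s = t := by
  have hs := String.ofList_toList (s := s)
  have ht := String.ofList_toList (s := t)
  rw [← hs, ← ht, h]

theorem pv_len2 : PySem.Str.len "\n\n" = (2 : Int) := by decide

theorem pv_dropWhile_head (cs : List Char) (c : Char)
    (h : (List.dropWhile PySem.Chars.isspace cs).head? = some c) :
    PySem.Chars.isspace c = false := by
  induction cs with
  | nil => simp at h
  | cons x t ih =>
    rw [List.dropWhile_cons] at h
    by_cases hx : PySem.Chars.isspace x
    · rw [if_pos hx] at h; exact ih h
    · rw [if_neg hx] at h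
      simp only [List.head?_cons, Option.some.injEq] at h
      subst h
      simpa using hx

theorem pv_dropWhile_self (l : List Char)
    (h : ∀ c, l.head? = some c → PySem.Chars.isspace c = false) :
    List.dropWhile PySem.Chars.isspace l = l := by
  cases l with
  | nil => rfl
  | cons x t =>
    have hx := h x rfl
    rw [List.dropWhile_cons, if_neg (by simp [hx])]

theorem pv_rstrip_prefix (l : List Char) : PySem.Chars.rstrip l <+: l := by
  have h := List.dropWhile_suffix (l := l.reverse) (p := PySem.Chars.isspace)
  have h2 := List.reverse_prefix.mpr h
  simpa [PySem.Chars.rstrip] using h2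

theorem pv_prefix_head {a l : List Char} (h : a <+: l) (hne : a ≠ []) :
    l.head? = a.head? := by
  obtain ⟨t, rfl⟩ := h
  cases a with
  | nil => exact absurd rfl hne
  | cons x s => simp

theorem pv_strip_head (cs : List Char) (c : Char)
    (h : (PySem.Chars.strip cs).head? = some c) : PySem.Chars.isspace c = false := by
  have hpre : PySem.Chars.strip cs <+: PySem.Chars.lstrip cs := pv_rstrip_prefix _
  have hne : PySem.Chars.strip cs ≠ [] := by
    intro h0; rw [h0] at h; simp at h
  have heq := pv_prefix_head hpre hne
  apply pv_dropWhile_head cs c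
  rw [show List.dropWhile PySem.Chars.isspace cs = PySem.Chars.lstrip cs from rfl, heq, h]

theorem pv_strip_last (cs : List Char) (c : Char)
    (h : (PySem.Chars.strip cs).getLast? = some c) : PySem.Chars.isspace c = false := by
  have hrw : (PySem.Chars.strip cs).getLast?
      = (List.dropWhile PySem.Chars.isspace (PySem.Chars.lstrip cs).reverse).head? := by
    simp [PySem.Chars.strip, PySem.Chars.rstrip, List.getLast?_reverse]
  rw [hrw] at h
  exact pv_dropWhile_head _ _ h

theorem pv_strip_eq_self (cs : List Char)
    (h1 : ∀ c, cs.head? = some c → PySem.Chars.isspace c = false)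
    (h2 : ∀ c, cs.getLast? = some c → PySem.Chars.isspace c = false) :
    PySem.Chars.strip cs = cs := by
  have hl : PySem.Chars.lstrip cs = cs := pv_dropWhile_self cs h1
  have hr : List.dropWhile PySem.Chars.isspace cs.reverse = cs.reverse := by
    apply pv_dropWhile_self
    intro c hc
    exact h2 c (by rwa [List.head?_reverse] at hc)
  rw [show PySem.Chars.strip cs = PySem.Chars.rstrip (PySem.Chars.lstrip cs) from rfl, hl,
      show PySem.Chars.rstrip cs = (List.dropWhile PySem.Chars.isspace cs.reverse).reverse from rfl,
      hr, List.reverse_reverse]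

theorem pv_join_facts (sep : List Char) (l : List (List Char)) (c0 : List Char)
    (h0 : c0 ≠ []) (h : ∀ s ∈ l, s ≠ []) :
    PySem.Chars.join sep (c0 :: l) ≠ [] ∧
    (PySem.Chars.join sep (c0 :: l)).head? = c0.head? ∧
    (PySem.Chars.join sep (c0 :: l)).getLast? = (l.getLastD c0).getLast? := by
  induction l generalizing c0 with
  | nil =>
    rw [PySem.Chars.join_singleton]
    exact ⟨h0, rfl, rfl⟩
  | cons b l' ih =>
    have hb : b ≠ [] := h b (by simp)
    have ih' := ih b hb (fun s hs => h s (by simp [hs]))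
    rw [PySem.Chars.join_cons_cons]
    refine ⟨?_, ?_, ?_⟩
    · intro hx
      rw [List.append_assoc] at hx
      rcases List.append_eq_nil_iff.mp hx with ⟨hc, -⟩
      exact h0 hc
    · rw [List.append_assoc, List.head?_append]
      cases c0 with
      | nil => exact absurd rfl h0
      | cons x t => simp
    · rw [List.getLast?_append, List.getLastD_cons, ← ih'.2.2]
      cases hj : (PySem.Chars.join sep (b :: l')).getLast? with
      | none => exact absurd (List.getLast?_eq_none_iff.mp hj) ih'.1
      | some z => simp [Option.or]

theorem pv_getLastD_map (f : String → List Char) (l : List String) (a : String) :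
    (l.map f).getLastD (f a) = f (l.getLastD a) := by
  induction l generalizing a with
  | nil => rfl
  | cons b t ih => simp only [List.map_cons, List.getLastD_cons]; exact ih b

theorem pv_getLastD_mem (l : List String) (a : String) : l.getLastD a ∈ a :: l := by
  induction l generalizing a with
  | nil => simp
  | cons b t ih =>
    rw [List.getLastD_cons]
    rcases List.mem_cons.mp (ih b) with h | h
    · rw [h]; simp
    · exact List.mem_cons_of_mem _ (List.mem_cons_of_mem _ h)

theorem pv_strip_join (c0 : String) (l : List String)
    (h : ∀ s ∈ c0 :: l, ∃ b, s = PySem.Str.strip b ∧ s ≠ "") :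
    PySem.Str.strip (PySem.Str.join "\n\n" (c0 :: l)) = PySem.Str.join "\n\n" (c0 :: l) := by
  apply pv_str_ext
  rw [PySem.Str.toList_strip, PySem.Str.toList_join]
  have hok : ∀ s ∈ c0 :: l, s.toList ≠ [] ∧
      (∀ c, s.toList.head? = some c → PySem.Chars.isspace c = false) ∧
      (∀ c, s.toList.getLast? = some c → PySem.Chars.isspace c = false) := by
    intro s hs
    obtain ⟨b, rfl, hne⟩ := h s hs
    have htl : (PySem.Str.strip b).toList = PySem.Chars.strip b.toList := PySem.Str.toList_strip b
    refine ⟨?_, ?_, ?_⟩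
    · intro h0; exact hne (pv_str_ext (by rw [h0]; rfl))
    · intro c hc; rw [htl] at hc; exact pv_strip_head _ _ hc
    · intro c hc; rw [htl] at hc; exact pv_strip_last _ _ hc
  have h0 : c0.toList ≠ [] := (hok c0 (by simp)).1
  have hl : ∀ s ∈ l.map String.toList, s ≠ [] := by
    intro s hs
    rw [List.mem_map] at hs
    obtain ⟨x, hx, rfl⟩ := hs
    exact (hok x (by simp [hx])).1
  have hj := pv_join_facts (("\n\n" : String).toList) (l.map String.toList) c0.toList h0 hl
  rw [List.map_cons]
  apply pv_strip_eq_self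
  · intro c hc
    rw [hj.2.1] at hc
    exact (hok c0 (by simp)).2.1 c hc
  · intro c hc
    rw [hj.2.2, pv_getLastD_map String.toList l c0] at hc
    exact (hok _ (pv_getLastD_mem l c0)).2.2 c hc

theorem pv_len_join (c0 : String) (l : List String) :
    PySem.Str.len (PySem.Str.join "\n\n" (c0 :: l))
      = PySem.Str.len c0 + (l.map (fun s => 2 + PySem.Str.len s)).sum := by
  induction l generalizing c0 with
  | nil =>
    simp only [PySem.Str.len, PySem.Str.toList_join, List.map_cons, List.map_nil,
      PySem.Chars.join_singleton, List.sum_nil, List.map_nil]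
    ring
  | cons b t ih =>
    have hsplit : (PySem.Str.join "\n\n" (c0 :: b :: t)).toList
        = c0.toList ++ ("\n\n" : String).toList ++ (PySem.Str.join "\n\n" (b :: t)).toList := by
      rw [PySem.Str.toList_join, PySem.Str.toList_join, List.map_cons]
      exact PySem.Chars.join_cons_cons _ _ _ _
    have ihb := ih b
    simp only [PySem.Str.len] at ihb ⊢
    rw [hsplit]
    simp only [List.length_append, List.map_cons, List.sum_cons]
    have hsep : (("\n\n" : String).toList).length = 2 := by decide
    rw [hsep]
    push_cast
    omega

theorem pv_take_le (limit : Int) (xs : List String) : ∀ used : Int, used ≤ limit →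
    used + ((xs.take (pvTake limit used xs)).map (fun s => 2 + PySem.Str.len s)).sum ≤ limit := by
  induction xs with
  | nil => intro used h; simpa [pvTake]
  | cons x t ih =>
    intro used h
    by_cases hc : limit < used + 2 + PySem.Str.len x
    · simp only [pvTake, if_pos hc, List.take_zero, List.map_nil, List.sum_nil, add_zero]
      exact h
    · have h2 : used + 2 + PySem.Str.len x ≤ limit := by omega
      have := ih (used + 2 + PySem.Str.len x) h2
      simp only [pvTake, if_neg hc, List.take_succ_cons, List.map_cons, List.sum_cons]
      omega

theorem pv_loopC_take (limit : Int) (cs : List String) : ∀ (out : List String) (used : Int),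
    out ≠ [] → pvLoopC limit cs out used = out ++ cs.take (pvTake limit used cs) := by
  induction cs with
  | nil => intro out used _; simp [pvLoopC, pvTake]
  | cons c rest ih =>
    intro out used h
    have e1 : (if out = [] then PySem.Str.len c else 2 + PySem.Str.len c)
        = 2 + PySem.Str.len c := if_neg h
    simp only [pvLoopC, pvTake, e1]
    by_cases hc : limit < used + 2 + PySem.Str.len c
    · rw [if_pos (show limit < used + (2 + PySem.Str.len c) by omega), if_pos hc]
      simp
    · rw [if_neg (show ¬ limit < used + (2 + PySem.Str.len c) by omega), if_neg hc,
        show used + (2 + PySem.Str.len c) = used + 2 + PySem.Str.len c by omega,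
        ih (out ++ [c]) (used + 2 + PySem.Str.len c) (by simp), List.take_succ_cons]
      simp

theorem pv_loopA_eq_loopC (limit : Int) (blocks : List String) : ∀ (out : List String) (used : Int),
    pvLoopA limit blocks out used
      = pvLoopC limit (blocks.filterMap (fun b =>
          let s := PySem.Str.strip b; if s = "" then none else some s)) out used := by
  induction blocks with
  | nil => intro out used; rfl
  | cons b rest ih =>
    intro out used
    by_cases hb : PySem.Str.strip b = ""
    · have hfm : (b :: rest).filterMap (fun b =>
            let s := PySem.Str.strip b; if s = "" then none else some s)
          = rest.filterMap (fun b =>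
            let s := PySem.Str.strip b; if s = "" then none else some s) := by
        simp [hb]
      rw [hfm]
      simp only [pvLoopA]
      rw [if_pos hb]
      exact ih out used
    · have hfm : (b :: rest).filterMap (fun b =>
            let s := PySem.Str.strip b; if s = "" then none else some s)
          = PySem.Str.strip b :: rest.filterMap (fun b =>
            let s := PySem.Str.strip b; if s = "" then none else some s) := by
        simp [hb]
      rw [hfm]
      simp only [pvLoopA, pvLoopC]
      rw [if_neg hb]
      by_cases ho : out = []
      · rw [if_pos ho, if_pos ho, ih]
      · have hlen : PySem.Str.len ("\n\n" ++ PySem.Str.strip b)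
            = 2 + PySem.Str.len (PySem.Str.strip b) := by
          rw [PySem.Str.len_append, pv_len2]
        rw [if_neg ho, if_neg ho, hlen, ih]

theorem pv_findIdx_totals (limit : Int) (xs : List String) : ∀ t0 : Int,
    ((pvTotalsB t0 xs).findIdx? (fun t => decide (limit < t))).getD (xs.length + 1)
      = if limit < t0 then 0 else pvTake limit t0 xs + 1 := by
  induction xs with
  | nil =>
    intro t0
    by_cases h : limit < t0 <;>
      simp [pvTotalsB, List.findIdx?_cons, pvTake, h]
  | cons x t ih =>
    intro t0
    by_cases h : limit < t0
    · simp [pvTotalsB, List.findIdx?_cons, h]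
    · have hA : ∀ (o : Option Nat) (n : Nat),
          ((Option.map (fun i => i + 1) o).getD (n + 1)) = o.getD n + 1 := by
        intro o n; cases o <;> simp
      simp only [pvTotalsB, List.findIdx?_cons]
      rw [if_neg (by simp [h]), List.length_cons, hA, ih (t0 + 2 + PySem.Str.len x)]
      by_cases h2 : limit < t0 + 2 + PySem.Str.len x <;>
        simp [pvTake, h]

-- ===== VERDICT (by name: the statement is the Claim_ definition above) =====
theorem join_blocks_with_limit_py_spec : Claim_equal_join_blocks_with_limit_py := by
  intro blocks limit _
  unfold Spec_join_blocks_with_limit_py join_blocks_with_limit_py join_blocks_with_limit_py_alt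
  rw [pv_loopA_eq_loopC]
  have hmem : ∀ s ∈ blocks.filterMap (fun b =>
      let s := PySem.Str.strip b; if s = "" then none else some s),
      ∃ b, s = PySem.Str.strip b ∧ s ≠ "" := by
    intro s hs
    rw [List.mem_filterMap] at hs
    obtain ⟨a, -, ha⟩ := hs
    have ha' : (if PySem.Str.strip a = "" then (none : Option String)
        else some (PySem.Str.strip a)) = some s := ha
    by_cases h0 : PySem.Str.strip a = ""
    · rw [if_pos h0] at ha'; exact absurd ha' (by simp)
    · rw [if_neg h0] at ha'
      have hsa := Option.some.inj ha'
      exact ⟨a, hsa.symm, fun hs0 => h0 (hsa.trans hs0)⟩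
  cases hcl : blocks.filterMap (fun b =>
      let s := PySem.Str.strip b; if s = "" then none else some s) with
  | nil =>
    show (if pvLoopC limit [] [] 0 = [] then ""
        else
          if PySem.Str.len (PySem.Str.strip (PySem.Str.join "\n\n" (pvLoopC limit [] [] 0))) ≤ limit
          then PySem.Str.strip (PySem.Str.join "\n\n" (pvLoopC limit [] [] 0))
          else pv_truncate (PySem.Str.strip (PySem.Str.join "\n\n" (pvLoopC limit [] [] 0))) limit)
      = ""
    simp [pvLoopC]
  | cons c0 rest =>
    have hmem' : ∀ s ∈ c0 :: rest, ∃ b, s = PySem.Str.strip b ∧ s ≠ "" := by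
      rw [← hcl]; exact hmem
    show (if pvLoopC limit (c0 :: rest) [] 0 = [] then ""
        else
          if PySem.Str.len (PySem.Str.strip (PySem.Str.join "\n\n"
              (pvLoopC limit (c0 :: rest) [] 0))) ≤ limit
          then PySem.Str.strip (PySem.Str.join "\n\n" (pvLoopC limit (c0 :: rest) [] 0))
          else pv_truncate (PySem.Str.strip (PySem.Str.join "\n\n"
              (pvLoopC limit (c0 :: rest) [] 0))) limit)
      = PySem.Str.join "\n\n" ((c0 :: rest).take
          (((pvTotalsB (PySem.Str.len c0) rest).findIdx?
            (fun t => decide (limit < t))).getD (c0 :: rest).length))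
    by_cases hfit : limit < 0 + PySem.Str.len c0
    · have hloop : pvLoopC limit (c0 :: rest) [] 0 = [] := by
        simp only [pvLoopC, if_true, List.nil_append]
        rw [if_pos hfit]
      have hk : ((pvTotalsB (PySem.Str.len c0) rest).findIdx?
            (fun t => decide (limit < t))).getD (c0 :: rest).length = 0 := by
        rw [List.length_cons, pv_findIdx_totals, if_pos (by omega)]
      rw [hloop, hk]
      simp [PySem.Str.join, PySem.Chars.join_nil]
    · have hfit' : PySem.Str.len c0 ≤ limit := by omega
      have hloop : pvLoopC limit (c0 :: rest) [] 0
          = c0 :: rest.take (pvTake limit (PySem.Str.len c0) rest) := by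
        simp only [pvLoopC, if_true, List.nil_append]
        rw [if_neg hfit, zero_add]
        exact pv_loopC_take limit rest [c0] (PySem.Str.len c0) (by simp)
      have hk : ((pvTotalsB (PySem.Str.len c0) rest).findIdx?
            (fun t => decide (limit < t))).getD (c0 :: rest).length
          = pvTake limit (PySem.Str.len c0) rest + 1 := by
        rw [List.length_cons, pv_findIdx_totals, if_neg (by omega)]
      have hsub : ∀ s ∈ c0 :: rest.take (pvTake limit (PySem.Str.len c0) rest),
          ∃ b, s = PySem.Str.strip b ∧ s ≠ "" := by
        intro s hs
        rcases List.mem_cons.mp hs with h | h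
        · exact hmem' s (by rw [h]; simp)
        · exact hmem' s (List.mem_cons_of_mem _ (List.take_subset _ _ h))
      have hsj := pv_strip_join c0 (rest.take (pvTake limit (PySem.Str.len c0) rest)) hsub
      have hlen : PySem.Str.len (PySem.Str.join "\n\n"
          (c0 :: rest.take (pvTake limit (PySem.Str.len c0) rest))) ≤ limit := by
        rw [pv_len_join]
        have := pv_take_le limit rest (PySem.Str.len c0) hfit'
        omega
      rw [hloop, hk, List.take_succ_cons, if_neg (by simp), hsj, if_pos hlen]
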